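-- pv_equiv track=rewrite | github.com/boss9293-ops/Marketflow-v1.1 | marketflow/backend/scripts/build_ai_briefing_v2.py | build_macro_inputs
-- ===== SOURCE A (Python) =====
-- from collections import Counter
-- from typing import Any
--
-- def build_macro_inputs(themes: list[str], clusters: list[dict[str, Any]]) -> dict[str, str]:
--     cluster_terms: list[str] = []
--     for cluster in clusters[:6]:
--         term_counter = cluster.get("term_counter")
--         if isinstance(term_counter, Counter):
--             cluster_terms.extend([str(term) for term, _ in term_counter.most_common(10)])
--         elif isinstance(term_counter, dict):
--             ordered = sorted(term_counter.items(), key=lambda item: item[1], reverse=True)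
--             cluster_terms.extend([str(term) for term, _ in ordered[:10]])
--     text = f"{' '.join(themes)} {' '.join(cluster_terms)}".lower()
--
--     rates = "neutral"
--     if any(keyword in text for keyword in ["yield up", "higher rates", "hawkish", "rate pressure", "rate hike"]):
--         rates = "up"
--     elif any(keyword in text for keyword in ["rate cut", "yield down", "dovish", "easing"]):
--         rates = "down"
--     elif any(keyword in text for keyword in ["fed", "rates", "yield", "treasury"]):
--         rates = "up"
--
--     oil = "neutral"
--     if any(keyword in text for keyword in ["oil surge", "oil higher", "crude higher", "brent higher"]):
--         oil = "higher"
--     elif any(keyword in text for keyword in ["oil lower", "crude lower", "brent lower"]):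
--         oil = "lower"
--     elif any(keyword in text for keyword in ["oil", "crude", "brent", "energy"]):
--         oil = "higher"
--
--     return {"rates": rates, "oil": oil}
-- ===== SOURCE B (Python) =====
-- # Different algorithm: instead of A's per-keyword `kw in text` if/elif cascades,
-- # B makes ONE left-to-right pass over the text with a first-character bucket
-- # index, collecting the set of keywords that occur, and then derives both
-- # labels from that set via a single unified first-match rule table.
-- _RULES = [
--     ("rates", "up", ["yield up", "higher rates", "hawkish", "rate pressure", "rate hike"]),
--     ("rates", "down", ["rate cut", "yield down", "dovish", "easing"]),
--     ("rates", "up", ["fed", "rates", "yield", "treasury"]),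
--     ("oil", "higher", ["oil surge", "oil higher", "crude higher", "brent higher"]),
--     ("oil", "lower", ["oil lower", "crude lower", "brent lower"]),
--     ("oil", "higher", ["oil", "crude", "brent", "energy"]),
-- ]
--
-- _BUCKETS: dict = {}
-- for _cat, _label, _kws in _RULES:
--     for _kw in _kws:
--         _BUCKETS.setdefault(_kw[0], []).append(_kw)
--
--
-- def _matched_keywords(text):
--     """All rule keywords occurring in text, found in one pass over the text."""
--     found = set()
--     for i, c in enumerate(text):
--         for kw in _BUCKETS.get(c, []):
--             if text.startswith(kw, i):
--                 found.add(kw)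
--     return found
--
--
-- def build_macro_inputs(themes, clusters):
--     # Counter is a dict subclass and Counter.most_common(10) is exactly
--     # sorted(items, key=count, reverse=True)[:10], so one dict branch suffices.
--     cluster_terms = [
--         str(term)
--         for cluster in clusters[:6]
--         if isinstance(cluster.get("term_counter"), dict)
--         for term, _ in sorted(cluster["term_counter"].items(),
--                               key=lambda item: item[1], reverse=True)[:10]
--     ]
--     text = f"{' '.join(themes)} {' '.join(cluster_terms)}".lower()
--     found = _matched_keywords(text)
--     out = {}
--     for cat, label, kws in _RULES:
--         if cat not in out and any(kw in found for kw in kws):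
--             out[cat] = label
--     return {"rates": out.get("rates", "neutral"), "oil": out.get("oil", "neutral")}
-- ===== Notes on version B (the rewrite author's own statement) =====
-- stated objective: alternative
-- what changed: Instead of A's two per-keyword if/elif `kw in text` cascades, B makes one left-to-right pass over the text with a first-character bucket index collecting the set of keywords that occur, then derives both labels from that set via a single unified (category, label, keywords) rule table filling a dict by first match; the term gathering becomes a flat comprehension.
import Mathlib
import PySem

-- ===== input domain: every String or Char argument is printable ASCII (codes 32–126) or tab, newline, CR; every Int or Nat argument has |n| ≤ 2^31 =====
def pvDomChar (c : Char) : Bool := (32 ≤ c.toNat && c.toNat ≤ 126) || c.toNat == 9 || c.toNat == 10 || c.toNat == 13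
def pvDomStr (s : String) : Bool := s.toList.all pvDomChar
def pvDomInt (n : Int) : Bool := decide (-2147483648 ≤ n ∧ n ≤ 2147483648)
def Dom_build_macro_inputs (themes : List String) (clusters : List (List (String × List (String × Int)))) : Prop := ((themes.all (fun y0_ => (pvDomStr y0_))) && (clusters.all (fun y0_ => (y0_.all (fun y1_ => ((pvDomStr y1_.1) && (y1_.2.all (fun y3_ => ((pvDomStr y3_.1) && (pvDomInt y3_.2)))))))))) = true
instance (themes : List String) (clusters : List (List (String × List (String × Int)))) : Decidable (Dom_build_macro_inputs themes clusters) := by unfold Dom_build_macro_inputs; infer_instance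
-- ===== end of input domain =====

-- B replaces A's per-keyword if/elif `kw in text` cascades by ONE left-to-right scan of the
-- text with a first-character bucket index that collects the set of occurring keywords, then
-- derives both labels from that set via a single unified rule table (objective: alternative).
-- Under the type convention a cluster's "term_counter" value is always an association list
-- (a dict); Python A's Counter branch computes the same top-10 as its dict branch
-- (Counter.most_common IS sorted-by-count-descending), so both ports carry the dict branch.

-- ===== PORT A =====
-- top-10 terms of one term_counter dict: sorted(items, key=value, reverse=True)[:10]
def pvTopTerms (tc : List (String × Int)) : List String :=
  (PySem.List.slice (PySem.List.sorted (PySem.Dict.ofList tc).items (fun item => item.2) true)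
      none (some 10)).map (fun item => item.1)

def build_macro_inputs (themes : List String) (clusters : List (List (String × List (String × Int)))) : List (String × String) :=
  let cluster_terms :=
    (PySem.List.slice clusters none (some 6)).foldl
      (fun acc cluster =>
        match (PySem.Dict.ofList cluster).get? "term_counter" with
        | some tc => acc ++ pvTopTerms tc
        | none => acc) []
  let text := PySem.Chars.lower
    (PySem.Chars.join [' '] (themes.map String.toList) ++ [' '] ++
     PySem.Chars.join [' '] (cluster_terms.map String.toList))
  let rates : String :=
    if (["yield up", "higher rates", "hawkish", "rate pressure", "rate hike"] : List String).any
        (fun keyword => PySem.Chars.isIn keyword.toList text) then "up"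
    else if (["rate cut", "yield down", "dovish", "easing"] : List String).any
        (fun keyword => PySem.Chars.isIn keyword.toList text) then "down"
    else if (["fed", "rates", "yield", "treasury"] : List String).any
        (fun keyword => PySem.Chars.isIn keyword.toList text) then "up"
    else "neutral"
  let oil : String :=
    if (["oil surge", "oil higher", "crude higher", "brent higher"] : List String).any
        (fun keyword => PySem.Chars.isIn keyword.toList text) then "higher"
    else if (["oil lower", "crude lower", "brent lower"] : List String).any
        (fun keyword => PySem.Chars.isIn keyword.toList text) then "lower"
    else if (["oil", "crude", "brent", "energy"] : List String).any
        (fun keyword => PySem.Chars.isIn keyword.toList text) then "higher"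
    else "neutral"
  [("rates", rates), ("oil", oil)]

-- ===== PORT B =====
-- _RULES: one unified (category, label, keywords) table for both categories
def pvRules : List (String × String × List String) :=
  [("rates", "up", ["yield up", "higher rates", "hawkish", "rate pressure", "rate hike"]),
   ("rates", "down", ["rate cut", "yield down", "dovish", "easing"]),
   ("rates", "up", ["fed", "rates", "yield", "treasury"]),
   ("oil", "higher", ["oil surge", "oil higher", "crude higher", "brent higher"]),
   ("oil", "lower", ["oil lower", "crude lower", "brent lower"]),
   ("oil", "higher", ["oil", "crude", "brent", "energy"])]

-- _BUCKETS: first character -> keywords; kw[0] via pyGet? (none is unreachable: no rule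
-- keyword is empty); setdefault(..., []).append(kw) is modify with default []
def pvBuckets : PySem.Dict Char (List String) :=
  pvRules.foldl
    (fun d r => r.2.2.foldl
      (fun d kw =>
        match PySem.List.pyGet? kw.toList 0 with
        | some c => d.modify c [] (fun l => l ++ [kw])
        | none => d) d)
    PySem.Dict.empty

-- _matched_keywords: one pass over enumerate(text); text.startswith(kw, i) with 0 ≤ i
-- is exactly startswith on the slice text[i:]
def pvScan (text : List Char) : PySem.Set String :=
  (PySem.List.enumerate text).foldl
    (fun found p =>
      (pvBuckets.getD p.2 []).foldl
        (fun found kw =>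
          if PySem.Chars.startswith (PySem.List.slice text (some p.1) none) kw.toList
          then PySem.Set.add found kw else found)
        found)
    PySem.Set.empty

def build_macro_inputs_alt (themes : List String) (clusters : List (List (String × List (String × Int)))) : List (String × String) :=
  let cluster_terms :=
    (PySem.List.slice clusters none (some 6)).flatMap
      (fun cluster =>
        match (PySem.Dict.ofList cluster).get? "term_counter" with
        | some tc => pvTopTerms tc
        | none => [])
  let text := PySem.Chars.lower
    (PySem.Chars.join [' '] (themes.map String.toList) ++ [' '] ++
     PySem.Chars.join [' '] (cluster_terms.map String.toList))
  let found := pvScan text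
  let out :=
    pvRules.foldl
      (fun (d : PySem.Dict String String) r =>
        if !d.contains r.1 && r.2.2.any (fun kw => PySem.Set.contains found kw)
        then d.insert r.1 r.2.1 else d)
      PySem.Dict.empty
  [("rates", out.getD "rates" "neutral"), ("oil", out.getD "oil" "neutral")]

-- ===== PRECONDITION & SPEC =====
def Spec_build_macro_inputs (themes : List String) (clusters : List (List (String × List (String × Int)))) (out : List (String × String)) : Prop := out = build_macro_inputs_alt themes clusters
instance (themes : List String) (clusters : List (List (String × List (String × Int)))) (out : List (String × String)) : Decidable (Spec_build_macro_inputs themes clusters out) := by unfold Spec_build_macro_inputs; infer_instance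

-- ===== CLAIM (what is proved, stated in full; the proofs are below) =====
def Claim_equal_build_macro_inputs : Prop := ∀ (themes : List String) (clusters : List (List (String × List (String × Int)))), Dom_build_macro_inputs themes clusters → Spec_build_macro_inputs themes clusters (build_macro_inputs themes clusters)

-- ===== LEMMAS AND PROOFS =====

-- A's extend-loop over the clusters equals B's flat comprehension
theorem pv_foldl_extend (cs : List (List (String × List (String × Int)))) (acc : List String) :
    cs.foldl
      (fun acc cluster =>
        match (PySem.Dict.ofList cluster).get? "term_counter" with
        | some tc => acc ++ pvTopTerms tc
        | none => acc) acc
    = acc ++ cs.flatMap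
        (fun cluster =>
          match (PySem.Dict.ofList cluster).get? "term_counter" with
          | some tc => pvTopTerms tc
          | none => []) := by
  induction cs generalizing acc with
  | nil => simp
  | cons c cs ih =>
      simp only [List.foldl_cons, List.flatMap_cons, ih]
      cases (PySem.Dict.ofList c).get? "term_counter" <;> simp

-- membership in a conditional-add fold over a list of candidate elements
theorem pv_mem_foldl_addIf (y : String) (l : List String) (q : String → Bool) (s : PySem.Set String) :
    y ∈ l.foldl (fun s x => if q x then PySem.Set.add s x else s) s ↔
      y ∈ s ∨ (y ∈ l ∧ q y = true) := by
  induction l generalizing s with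
  | nil => simp
  | cons x t ih =>
      simp only [List.foldl_cons, ih, List.mem_cons]
      by_cases hq : q x = true
      · simp only [if_pos hq, PySem.Set.mem_add]
        by_cases hy : y = x
        · subst hy; tauto
        · tauto
      · simp only [if_neg hq]
        by_cases hy : y = x
        · subst hy; tauto
        · tauto

-- membership characterisation of enumerate
theorem pv_mem_enumerate {α : Type} (xs : List α) (k : Int) (p : Int × α) :
    p ∈ PySem.List.enumerate xs k ↔
      ∃ j : Nat, j < xs.length ∧ p.1 = k + j ∧ xs[j]? = some p.2 := by
  induction xs generalizing k with
  | nil => simp [PySem.List.enumerate]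
  | cons x t ih =>
      rw [PySem.List.enumerate_cons]
      simp only [List.mem_cons, ih]
      constructor
      · rintro (rfl | ⟨j, hj, h1, h2⟩)
        · exact ⟨0, by simp, by simp, by simp⟩
        · refine ⟨j + 1, by simpa using hj, by push_cast at h1 ⊢; omega, by simpa using h2⟩
      · rintro ⟨j, hj, h1, h2⟩
        cases j with
        | zero =>
            left
            obtain ⟨p1, p2⟩ := p
            simp at h1 h2
            simp [h1, h2]
        | succ j =>
            right
            exact ⟨j, by simpa using hj, by push_cast at h1 ⊢; omega, by simpa using h2⟩

-- unfolding pvScan's outer fold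
theorem pv_mem_scan_aux (text : List Char) (y : String) (t : List Char) (k : Int) (s : PySem.Set String) :
    y ∈ (PySem.List.enumerate t k).foldl
          (fun found p =>
            (pvBuckets.getD p.2 []).foldl
              (fun found kw =>
                if PySem.Chars.startswith (PySem.List.slice text (some p.1) none) kw.toList
                then PySem.Set.add found kw else found)
              found) s ↔
      y ∈ s ∨ ∃ p ∈ PySem.List.enumerate t k, y ∈ pvBuckets.getD p.2 [] ∧
        PySem.Chars.startswith (PySem.List.slice text (some p.1) none) y.toList = true := by
  induction t generalizing k s with
  | nil => simp [PySem.List.enumerate]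
  | cons c t ih =>
      rw [PySem.List.enumerate_cons]
      simp only [List.foldl_cons, ih, pv_mem_foldl_addIf, List.mem_cons]
      constructor
      · rintro (((hs | ⟨hb, hq⟩) | ⟨p, hp, hb, hq⟩))
        · exact Or.inl hs
        · exact Or.inr ⟨(k, c), Or.inl rfl, hb, hq⟩
        · exact Or.inr ⟨p, Or.inr hp, hb, hq⟩
      · rintro (hs | ⟨p, (rfl | hp), hb, hq⟩)
        · exact Or.inl (Or.inl hs)
        · exact Or.inl (Or.inr ⟨hb, hq⟩)
        · exact Or.inr ⟨p, hp, hb, hq⟩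

-- a keyword whose first character is bucketed is found by the scan iff it occurs in the text
theorem pv_mem_scan_iff (text : List Char) (kw : String) (c : Char)
    (hne : kw.toList.head? = some c) (hb : kw ∈ pvBuckets.getD c []) :
    kw ∈ pvScan text ↔ PySem.Chars.isIn kw.toList text = true := by
  rw [← PySem.Chars.exists_prefix_drop_iff_isIn]
  unfold pvScan
  rw [pv_mem_scan_aux]
  simp only [PySem.Set.empty, List.not_mem_nil, false_or]
  constructor
  · rintro ⟨p, hp, _, hq⟩
    rw [pv_mem_enumerate] at hp
    obtain ⟨j, hj, h1, h2⟩ := hp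
    refine ⟨j, ?_⟩
    have h0 : p.1 = (j : Int) := by omega
    rw [h0, PySem.List.slice_from_natCast] at hq
    exact (PySem.Chars.startswith_iff _ _).mp hq
  · rintro ⟨j, hpre⟩
    have hkne : kw.toList ≠ [] := by
      intro h; rw [h] at hne; simp at hne
    have hj : j < text.length := by
      by_contra h
      rw [List.drop_eq_nil_of_le (by omega)] at hpre
      exact hkne (List.prefix_nil.mp hpre)
    have hhd : text[j]? = some c := by
      obtain ⟨t2, ht2⟩ := hpre
      rw [← List.head?_drop, ← ht2, List.head?_append, hne]
      rfl
    refine ⟨((j : Int), c), ?_, hb, ?_⟩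
    · rw [pv_mem_enumerate]
      exact ⟨j, hj, by simp, hhd⟩
    · rw [PySem.List.slice_from_natCast]
      exact (PySem.Chars.startswith_iff _ _).mpr hpre

theorem pv_contains_scan (text : List Char) (kw : String) (c : Char)
    (hne : kw.toList.head? = some c) (hb : kw ∈ pvBuckets.getD c []) :
    PySem.Set.contains (pvScan text) kw = PySem.Chars.isIn kw.toList text := by
  rw [Bool.eq_iff_iff, PySem.Set.contains_iff]
  exact pv_mem_scan_iff text kw c hne hb

-- derivation of the two labels from the rule-table fold, for any occurrence predicate f
theorem pv_final (f : String → Bool) :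
    (let out :=
      pvRules.foldl
        (fun (d : PySem.Dict String String) r =>
          if !d.contains r.1 && r.2.2.any f then d.insert r.1 r.2.1 else d)
        PySem.Dict.empty
     ([("rates", out.getD "rates" "neutral"), ("oil", out.getD "oil" "neutral")] : List (String × String)))
    = [("rates",
        if (["yield up", "higher rates", "hawkish", "rate pressure", "rate hike"] : List String).any f then "up"
        else if (["rate cut", "yield down", "dovish", "easing"] : List String).any f then "down"
        else if (["fed", "rates", "yield", "treasury"] : List String).any f then "up"
        else "neutral"),
       ("oil",
        if (["oil surge", "oil higher", "crude higher", "brent higher"] : List String).any f then "higher"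
        else if (["oil lower", "crude lower", "brent lower"] : List String).any f then "lower"
        else if (["oil", "crude", "brent", "energy"] : List String).any f then "higher"
        else "neutral")] := by
  simp only [pvRules, List.foldl_cons, List.foldl_nil]
  generalize (["yield up", "higher rates", "hawkish", "rate pressure", "rate hike"] : List String).any f = c1
  generalize (["rate cut", "yield down", "dovish", "easing"] : List String).any f = c2
  generalize (["fed", "rates", "yield", "treasury"] : List String).any f = c3
  generalize (["oil surge", "oil higher", "crude higher", "brent higher"] : List String).any f = c4
  generalize (["oil lower", "crude lower", "brent lower"] : List String).any f = c5
  generalize (["oil", "crude", "brent", "energy"] : List String).any f = c6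
  revert c1 c2 c3 c4 c5 c6
  decide

-- ===== VERDICT (by name: the statement is the Claim_ definition above) =====
theorem build_macro_inputs_spec : Claim_equal_build_macro_inputs := by
  intro themes clusters _
  unfold Spec_build_macro_inputs build_macro_inputs build_macro_inputs_alt
  rw [pv_foldl_extend]
  simp only [List.nil_append]
  rw [pv_final]
  simp only [List.any_cons, List.any_nil,
    pv_contains_scan _ "yield up" 'y' rfl (by decide),
    pv_contains_scan _ "higher rates" 'h' rfl (by decide),
    pv_contains_scan _ "hawkish" 'h' rfl (by decide),
    pv_contains_scan _ "rate pressure" 'r' rfl (by decide),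
    pv_contains_scan _ "rate hike" 'r' rfl (by decide),
    pv_contains_scan _ "rate cut" 'r' rfl (by decide),
    pv_contains_scan _ "yield down" 'y' rfl (by decide),
    pv_contains_scan _ "dovish" 'd' rfl (by decide),
    pv_contains_scan _ "easing" 'e' rfl (by decide),
    pv_contains_scan _ "fed" 'f' rfl (by decide),
    pv_contains_scan _ "rates" 'r' rfl (by decide),
    pv_contains_scan _ "yield" 'y' rfl (by decide),
    pv_contains_scan _ "treasury" 't' rfl (by decide),
    pv_contains_scan _ "oil surge" 'o' rfl (by decide),
    pv_contains_scan _ "oil higher" 'o' rfl (by decide),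
    pv_contains_scan _ "crude higher" 'c' rfl (by decide),
    pv_contains_scan _ "brent higher" 'b' rfl (by decide),
    pv_contains_scan _ "oil lower" 'o' rfl (by decide),
    pv_contains_scan _ "crude lower" 'c' rfl (by decide),
    pv_contains_scan _ "brent lower" 'b' rfl (by decide),
    pv_contains_scan _ "oil" 'o' rfl (by decide),
    pv_contains_scan _ "crude" 'c' rfl (by decide),
    pv_contains_scan _ "brent" 'b' rfl (by decide),
    pv_contains_scan _ "energy" 'e' rfl (by decide)]
  rfl
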